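-- pv_equiv track=rewrite | github.com/adnanyaqoobvirk/leetcode | 3481-apply-substitutions/3481-apply-substitutions.py | applySubstitutions
-- ===== SOURCE A (Python) =====
-- from typing import List
--
-- def applySubstitutions(replacements: List[List[str]], text: str) -> str:
--     def solve(k: str) -> str:
--         if "%" not in kmap[k]:
--             return kmap[k]
--
--         res = []
--         i = 0
--         v = kmap[k]
--         n = len(v)
--         while i < n:
--             if v[i] == "%":
--                 res.append(solve(v[i + 1]))
--                 i += 3
--             else:
--                 res.append(v[i])
--                 i += 1
--         kmap[k] = "".join(res)
--         return kmap[k]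
--
--     kmap = {"#": text}
--     for k, v in replacements:
--         kmap[k] = v
--
--     return solve("#")
-- ===== SOURCE B (Python) =====
-- from typing import List
--
-- def applySubstitutions(replacements: List[List[str]], text: str) -> str:
--     # Bottom-up fixed-point table filling: no recursion, no call stack.  In
--     # len(kmap)+1 rounds, rewrite in place every value whose referenced keys
--     # (found by the same 3-char-consuming scan A uses) are all fully resolved;
--     # each round resolves the next dependency level, so '#' is resolved last.
--     kmap = {"#": text}
--     for k, v in replacements:
--         kmap[k] = v
--
--     def scan(v):
--         # referenced keys under the same parse as A, or None if v is malformed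
--         rs, i = [], 0
--         while i < len(v):
--             if v[i] == "%":
--                 if i + 1 >= len(v):
--                     return None
--                 rs.append(v[i + 1])
--                 i += 3
--             else:
--                 i += 1
--         return rs
--
--     for _ in range(len(kmap) + 1):
--         for k in list(kmap):
--             v = kmap[k]
--             if "%" not in v:
--                 continue
--             rs = scan(v)
--             if rs is None or not all(r in kmap and "%" not in kmap[r] for r in rs):
--                 continue
--             parts, i = [], 0
--             while i < len(v):
--                 if v[i] == "%":
--                     parts.append(kmap[v[i + 1]])
--                     i += 3
--                 else:
--                     parts.append(v[i])
--                     i += 1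
--             kmap[k] = "".join(parts)
--     return kmap["#"]
-- ===== Notes on version B (the rewrite author's own statement) =====
-- stated objective: alternative
-- what changed: A resolves keys top-down by recursive DFS with memoization into the mutated dict; B never recurses: it fills the table bottom-up in fixed-point rounds, rewriting in place each value all of whose referenced keys (found by the same 3-char-consuming scan) are already %-free, until '#' is fully resolved.
import Mathlib
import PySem

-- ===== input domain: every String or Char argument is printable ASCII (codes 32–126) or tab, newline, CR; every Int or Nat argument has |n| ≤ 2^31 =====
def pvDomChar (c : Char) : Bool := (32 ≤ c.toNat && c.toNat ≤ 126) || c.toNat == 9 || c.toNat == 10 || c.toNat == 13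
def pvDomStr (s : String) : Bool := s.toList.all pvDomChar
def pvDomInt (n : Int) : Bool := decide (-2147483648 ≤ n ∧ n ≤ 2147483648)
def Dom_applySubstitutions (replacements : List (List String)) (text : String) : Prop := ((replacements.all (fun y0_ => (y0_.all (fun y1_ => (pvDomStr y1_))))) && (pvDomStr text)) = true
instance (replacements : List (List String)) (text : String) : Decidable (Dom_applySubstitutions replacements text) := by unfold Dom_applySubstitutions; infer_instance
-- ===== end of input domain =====

-- B replaces A's recursive memoized DFS by bottom-up fixed-point rounds that rewrite each
-- value in place once all its referenced keys are already %-free; equal wherever A returns.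

-- ===== PORT A =====
-- kmap = {"#": text}; for k, v in replacements: kmap[k] = v   (shared by both ports;
-- a row that is not a 2-list raises ValueError in Python — excluded by Pre_, skipped here)
def pvBuild (replacements : List (List String)) (text : String) : PySem.Dict String String :=
  replacements.foldl
    (fun d row => match row with
      | [k, v] => d.insert k v
      | _ => d)
    ((PySem.Dict.empty).insert "#" text)

-- solve(k) and its inner while-loop over v = kmap[k]; the dict is threaded as state.
-- fuel only pays for Python's unbounded recursion: under Pre_ (acyclic dependencies)
-- the recursion depth is < number of keys, so the fuel chosen below never runs out.
-- On '%' the loop reads v[i+1] (IndexError when '%' is last — excluded by Pre_) and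
-- advances i += 3; otherwise it copies v[i].  Missing keys (KeyError) excluded by Pre_.
mutual
def pvSolveA : Nat → PySem.Dict String String → String → String × PySem.Dict String String
  | 0, km, _ => ("", km)          -- unreachable under Pre_
  | fuel + 1, km, k =>
    let v := km.getD k ""  -- kmap[k] (KeyError excluded by Pre_)
    if PySem.Str.isIn "%" v then
      let p := pvLoopA fuel km v.toList
      let out := PySem.Str.join "" p.1     -- "".join(res)
      (out, p.2.insert k out)              -- kmap[k] = ...; return kmap[k]
    else (v, km)                           -- "%" not in kmap[k]
  termination_by fuel _ _ => (fuel, 0)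
def pvLoopA (fuel : Nat) (km : PySem.Dict String String) :
    List Char → List String × PySem.Dict String String
  | [] => ([], km)
  | c :: rest =>
    if c = '%' then
      match rest with
      | [] => ([], km)                     -- v[i+1]: IndexError, excluded by Pre_
      | key :: rest2 =>
        let s := pvSolveA fuel km (String.ofList [key])   -- res.append(solve(v[i+1]))
        let r := pvLoopA fuel s.2 (rest2.drop 1)          -- i += 3
        (s.1 :: r.1, r.2)
    else
      let r := pvLoopA fuel km rest                       -- res.append(v[i]); i += 1
      (c.toString :: r.1, r.2)
  termination_by l => (fuel, l.length + 1)
  decreasing_by all_goals simp; omega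
end

def applySubstitutions (replacements : List (List String)) (text : String) : String :=
  (pvSolveA (replacements.length + 2) (pvBuild replacements text) "#").1

-- ===== PORT B =====
def pvKeyStr (c : Char) : String := String.ofList [c]

-- scan(v): the referenced keys under the same 3-char-consuming parse as A,
-- or None when the parse would read past the end (v[i+1] out of range)
def pvScan : List Char → Option (List Char)
  | [] => some []
  | '%' :: [] => none
  | '%' :: c :: rest => (pvScan (rest.drop 1)).map (c :: ·)
  | _ :: rest => pvScan rest
  termination_by l => l.length
  decreasing_by all_goals (simp; try omega)

-- the inner splice loop: parts.append(kmap[v[i+1]]) / parts.append(v[i])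
def pvSplice (km : PySem.Dict String String) : List Char → List String
  | [] => []
  | '%' :: [] => []                       -- unreachable: guarded by scan ≠ None
  | '%' :: c :: rest => km.getD (pvKeyStr c) "" :: pvSplice km (rest.drop 1)
  | c :: rest => c.toString :: pvSplice km rest
  termination_by l => l.length
  decreasing_by all_goals (simp; try omega)

-- one key of one round: rewrite kmap[k] iff it has a '%', scans cleanly, and all
-- referenced keys are present and already %-free
def pvDoKey (km : PySem.Dict String String) (k : String) : PySem.Dict String String :=
  if PySem.Str.isIn "%" (km.getD k "") then        -- v = kmap[k]; if "%" not in v: continue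
    match pvScan (km.getD k "").toList with
    | none => km
    | some rs =>
      if (rs.map pvKeyStr).all (fun r => km.contains r && !(PySem.Str.isIn "%" (km.getD r ""))) then
        km.insert k (PySem.Str.join "" (pvSplice km (km.getD k "").toList))
      else km
  else km

-- one round: for k in list(kmap)
def pvRoundB (km : PySem.Dict String String) : PySem.Dict String String :=
  km.keys.foldl pvDoKey km

-- for _ in range(len(kmap) + 1): one round each
def applySubstitutions_alt (replacements : List (List String)) (text : String) : String :=
  let km := pvBuild replacements text
  let km2 := (List.range (km.keys.length + 1)).foldl (fun d _ => pvRoundB d) km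
  km2.getD "#" ""

-- ===== PRECONDITION & SPEC =====
-- structural twins of pvRefs/pvOk (same values; kernel-computable for `decide`):
-- pvOkS is the token grammar of a value: every '%' starts a 3-character token
-- "%kx" (possibly truncated to "%k" at the very end); pvRefsS lists the keys k
def pvRefsS : List Char → List Char
  | [] => []
  | '%' :: [] => []
  | '%' :: c :: [] => [c]
  | '%' :: c :: _ :: rest => c :: pvRefsS rest
  | c :: rest =>
    if c = '%' then [] else pvRefsS rest   -- first branch unreachable (covered above)

def pvOkS : List Char → Bool
  | [] => true
  | '%' :: [] => false
  | '%' :: _ :: [] => true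
  | '%' :: _ :: _ :: rest => pvOkS rest
  | c :: rest =>
    if c = '%' then false else pvOkS rest  -- first branch unreachable (covered above)

def pvKeysOf (d : PySem.Dict String String) (k : String) : List String :=
  (pvRefsS (d.getD k "").toList).map pvKeyStr

-- reachability as a plain list computation: iterate "add every referenced key"
def pvStepList (d : PySem.Dict String String) (S : List String) : List String :=
  (S ++ S.flatMap (pvKeysOf d)).dedup

def pvIterList (d : PySem.Dict String String) : Nat → List String → List String
  | 0, S => S
  | n + 1, S => pvStepList d (pvIterList d n S)

def pvClosList (d : PySem.Dict String String) (S : List String) : List String :=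
  pvIterList d (d.keys.length + 1) S

-- the keys reachable from '#': exactly those whose values A's solve ever scans
def pvRList (d : PySem.Dict String String) : List String :=
  pvClosList d ["#"]

-- Pre_ excludes exactly the inputs on which A raises: a replacement row that is not a
-- 2-list (ValueError), and any key reachable from '#' that is missing (KeyError), whose
-- value the 3-char parse scans past its end (IndexError), or that lies on a reference
-- cycle (RecursionError); unreachable keys are unconstrained.  pvOkS is a local shape
-- predicate on one string (the token grammar above), and pvRList a membership closure
-- over single-character reference edges — neither runs A's solver or B's rounds.
def Pre_applySubstitutions (replacements : List (List String)) (text : String) : Prop :=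
  (replacements.all (fun row => row.length == 2) = true) ∧
  ((pvRList (pvBuild replacements text)).all (fun k =>
    (pvBuild replacements text).keys.contains k &&
    pvOkS ((pvBuild replacements text).getD k "").toList &&
    !((pvClosList (pvBuild replacements text)
        (pvKeysOf (pvBuild replacements text) k)).contains k)) = true)
instance (replacements : List (List String)) (text : String) :
    Decidable (Pre_applySubstitutions replacements text) := by
  unfold Pre_applySubstitutions; infer_instance

def pvWitness_applySubstitutions : List (List String) × String := ([["a", "x"]], "y%a%")

def Spec_applySubstitutions (replacements : List (List String)) (text : String) (out : String) : Prop := out = applySubstitutions_alt replacements text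
instance (replacements : List (List String)) (text : String) (out : String) : Decidable (Spec_applySubstitutions replacements text out) := by unfold Spec_applySubstitutions; infer_instance

-- ===== CLAIM (what is proved, stated in full; the proofs are below) =====
def Claim_equal_applySubstitutions : Prop := ∀ (replacements : List (List String)) (text : String), Dom_applySubstitutions replacements text → Pre_applySubstitutions replacements text → Spec_applySubstitutions replacements text (applySubstitutions replacements text)

-- ===== LEMMAS AND PROOFS =====

-- the same parse, specification-side: referenced keys and "scan stays in bounds"
def pvRefs : List Char → List Char
  | [] => []
  | '%' :: [] => []
  | '%' :: c :: rest => c :: pvRefs (rest.drop 1)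
  | _ :: rest => pvRefs rest
  termination_by l => l.length
  decreasing_by all_goals (simp; try omega)

def pvOk : List Char → Bool
  | [] => true
  | '%' :: [] => false
  | '%' :: _ :: rest => pvOk (rest.drop 1)
  | _ :: rest => pvOk rest
  termination_by l => l.length
  decreasing_by all_goals (simp; try omega)


def pvDeps (d : PySem.Dict String String) (k : String) : Finset String :=
  ((pvRefs (d.getD k "").toList).map pvKeyStr).toFinset

def pvStep (d : PySem.Dict String String) (S : Finset String) : Finset String :=
  S ∪ S.biUnion (pvDeps d)

def pvClosure (d : PySem.Dict String String) (S : Finset String) : Finset String :=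
  (pvStep d)^[d.keys.toFinset.card + 1] S

-- the keys reachable from '#': exactly those whose values A's solve ever scans
def pvR (d : PySem.Dict String String) : Finset String :=
  pvClosure d {"#"}

def pvU (d : PySem.Dict String String) : Finset String := d.keys.toFinset

def pvRank (d : PySem.Dict String String) (k : String) : Nat :=
  (pvClosure d (pvDeps d k)).card

-- proof-side bundle of the facts Pre_ gives about the built dict
def pvGood (d : PySem.Dict String String) : Prop :=
  d.keys.Nodup ∧
  ∀ k ∈ pvR d, k ∈ d.keys ∧ pvOk ((d.getD k "").toList) = true ∧
    k ∉ pvClosure d (pvDeps d k)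

-- fuel-indexed full expansion (the common specification of both programs)
mutual
def pvExpKey (d : PySem.Dict String String) : Nat → String → List Char
  | 0, _ => []
  | f + 1, k => pvExpStr d f (d.getD k "").toList
  termination_by f _ => (f, 0)
def pvExpStr (d : PySem.Dict String String) : Nat → List Char → List Char
  | _, [] => []
  | _, '%' :: [] => []
  | f, '%' :: c :: rest => pvExpKey d f (pvKeyStr c) ++ pvExpStr d f (rest.drop 1)
  | f, c :: rest => c :: pvExpStr d f rest
  termination_by f l => (f, l.length + 1)
  decreasing_by all_goals (simp; try omega)
end

def pvE (d : PySem.Dict String String) (k : String) : List Char :=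
  pvExpKey d ((pvU d).card + 1) k

-- one-level expansion with fully expanded references
def pvT (d : PySem.Dict String String) : List Char → List Char
  | [] => []
  | '%' :: [] => []
  | '%' :: c :: rest => pvE d (pvKeyStr c) ++ pvT d (rest.drop 1)
  | c :: rest => c :: pvT d rest
  termination_by l => l.length
  decreasing_by all_goals (simp; try omega)

-- ---- graph lemmas ----
theorem pvStep_mono {d : PySem.Dict String String} {S T : Finset String} (h : S ⊆ T) :
    pvStep d S ⊆ pvStep d T :=
  Finset.union_subset_union h (Finset.biUnion_subset_biUnion_of_subset_left _ h)

theorem pvSubset_step (d : PySem.Dict String String) (S : Finset String) : S ⊆ pvStep d S :=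
  Finset.subset_union_left

theorem pvDeps_subset_step {d : PySem.Dict String String} {S : Finset String} {k : String}
    (hk : k ∈ S) : pvDeps d k ⊆ pvStep d S :=
  subset_trans (Finset.subset_biUnion_of_mem _ hk) Finset.subset_union_right

theorem pvIter_chain (d : PySem.Dict String String) (S : Finset String) (n : Nat) :
    (pvStep d)^[n] S ⊆ (pvStep d)^[n + 1] S := by
  rw [Function.iterate_succ_apply']
  exact pvSubset_step d _

theorem pvIter_mono_n {d : PySem.Dict String String} {S : Finset String} {n m : Nat}
    (h : n ≤ m) : (pvStep d)^[n] S ⊆ (pvStep d)^[m] S := by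
  induction m with
  | zero => simpa [Nat.le_zero.mp h]
  | succ m ih =>
    rcases Nat.lt_or_ge n (m + 1) with hlt | hge
    · exact subset_trans (ih (by omega)) (pvIter_chain d S m)
    · have : n = m + 1 := by omega
      simp [this]

theorem pvIter_mono_S {d : PySem.Dict String String} {S T : Finset String} (h : S ⊆ T)
    (n : Nat) : (pvStep d)^[n] S ⊆ (pvStep d)^[n] T := by
  induction n with
  | zero => simpa
  | succ n ih =>
    rw [Function.iterate_succ_apply', Function.iterate_succ_apply']
    exact pvStep_mono ih

theorem pvSubset_closure (d : PySem.Dict String String) (S : Finset String) :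
    S ⊆ pvClosure d S := by
  unfold pvClosure
  exact pvIter_mono_n (Nat.zero_le _)

theorem pvR_subset_U {d : PySem.Dict String String} (hg : pvGood d) : pvR d ⊆ pvU d := by
  intro k hk
  simpa [pvU] using (hg.2 k hk).1

theorem pvClosure_fixed' {d : PySem.Dict String String} {S : Finset String}
    (hsub : (pvStep d)^[(pvU d).card + 1] S ⊆ pvU d) :
    pvStep d (pvClosure d S) = pvClosure d S := by
  have chain : ∀ n, (pvStep d)^[n] S ⊆ (pvStep d)^[n+1] S := pvIter_chain d S
  have key : ∃ j < (pvU d).card + 1, (pvStep d)^[j+1] S = (pvStep d)^[j] S := by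
    by_contra hc
    push_neg at hc
    have grow : ∀ j, j ≤ (pvU d).card + 1 → j ≤ ((pvStep d)^[j] S).card := by
      intro j hj
      induction j with
      | zero => simp
      | succ i ih =>
        have h1 : (pvStep d)^[i] S ⊂ (pvStep d)^[i+1] S :=
          (chain i).ssubset_of_ne (fun e => hc i (by omega) e.symm)
        have h2 := Finset.card_lt_card h1
        have h3 := ih (by omega)
        omega
    have h4 := grow ((pvU d).card + 1) le_rfl
    have h5 := Finset.card_le_card hsub
    omega
  obtain ⟨j, hj, hfix⟩ := key
  have hconst : ∀ m, (pvStep d)^[j + m] S = (pvStep d)^[j] S := by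
    intro m
    induction m with
    | zero => rfl
    | succ m ih =>
      have e : j + (m + 1) = (j + m) + 1 := by omega
      rw [e, Function.iterate_succ_apply', ih]
      calc pvStep d ((pvStep d)^[j] S) = (pvStep d)^[j + 1] S :=
            (Function.iterate_succ_apply' _ _ _).symm
      _ = (pvStep d)^[j] S := hfix
  have hcl : pvClosure d S = (pvStep d)^[j] S := by
    unfold pvClosure
    show (pvStep d)^[(pvU d).card + 1] S = (pvStep d)^[j] S
    rw [show (pvU d).card + 1 = j + ((pvU d).card + 1 - j) by omega, hconst]
  rw [hcl]
  calc pvStep d ((pvStep d)^[j] S) = (pvStep d)^[j + 1] S :=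
        (Function.iterate_succ_apply' _ _ _).symm
  _ = (pvStep d)^[j] S := hfix

theorem pvR_fixed {d : PySem.Dict String String} (hg : pvGood d) :
    pvStep d (pvR d) = pvR d := by
  apply pvClosure_fixed'
  exact pvR_subset_U hg

theorem pvIter_R_fixed {d : PySem.Dict String String} (hg : pvGood d) (n : Nat) :
    (pvStep d)^[n] (pvR d) = pvR d := by
  induction n with
  | zero => rfl
  | succ n ih => rw [Function.iterate_succ_apply', ih, pvR_fixed hg]

theorem pvDeps_subset_R {d : PySem.Dict String String} (hg : pvGood d) {k : String}
    (hk : k ∈ pvR d) : pvDeps d k ⊆ pvR d := by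
  rw [← pvR_fixed hg]
  exact pvDeps_subset_step hk

theorem pvClosure_subset_R {d : PySem.Dict String String} (hg : pvGood d) {S : Finset String}
    (hS : S ⊆ pvR d) : pvClosure d S ⊆ pvR d := by
  unfold pvClosure
  calc (pvStep d)^[(pvU d).card + 1] S ⊆ (pvStep d)^[(pvU d).card + 1] (pvR d) :=
        pvIter_mono_S hS _
  _ = pvR d := pvIter_R_fixed hg _

theorem pvClosure_deps_fixed {d : PySem.Dict String String} (hg : pvGood d) {k : String}
    (hk : k ∈ pvR d) : pvStep d (pvClosure d (pvDeps d k)) = pvClosure d (pvDeps d k) := by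
  apply pvClosure_fixed'
  calc (pvStep d)^[(pvU d).card + 1] (pvDeps d k)
      ⊆ (pvStep d)^[(pvU d).card + 1] (pvR d) := pvIter_mono_S (pvDeps_subset_R hg hk) _
  _ = pvR d := pvIter_R_fixed hg _
  _ ⊆ pvU d := pvR_subset_U hg

theorem pvClosure_subset_of_fixed {d : PySem.Dict String String} {S T : Finset String}
    (hT : pvStep d T = T) (h : S ⊆ T) : pvClosure d S ⊆ T := by
  unfold pvClosure
  generalize (d.keys.toFinset.card + 1) = n
  induction n with
  | zero => simpa using h
  | succ n ih =>
    rw [Function.iterate_succ_apply']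
    calc pvStep d ((pvStep d)^[n] S) ⊆ pvStep d T := pvStep_mono ih
    _ = T := hT

theorem pvRank_lt {d : PySem.Dict String String} (hg : pvGood d) {k k' : String}
    (hk : k ∈ pvR d) (hk' : k' ∈ pvDeps d k) : pvRank d k' < pvRank d k := by
  have hk'R : k' ∈ pvR d := pvDeps_subset_R hg hk hk'
  have hmem : k' ∈ pvClosure d (pvDeps d k) := pvSubset_closure d _ hk'
  have hsub : pvClosure d (pvDeps d k') ⊆ pvClosure d (pvDeps d k) := by
    apply pvClosure_subset_of_fixed (pvClosure_deps_fixed hg hk)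
    calc pvDeps d k' ⊆ pvStep d (pvClosure d (pvDeps d k)) := pvDeps_subset_step hmem
    _ = pvClosure d (pvDeps d k) := pvClosure_deps_fixed hg hk
  have hnot : k' ∉ pvClosure d (pvDeps d k') := (hg.2 k' hk'R).2.2
  exact Finset.card_lt_card (hsub.ssubset_of_ne (fun e => hnot (e ▸ hmem)))

theorem pvRank_lt_card {d : PySem.Dict String String} (hg : pvGood d) {k : String}
    (hk : k ∈ pvR d) : pvRank d k < (pvU d).card := by
  have hclR : pvClosure d (pvDeps d k) ⊆ pvR d :=
    pvClosure_subset_R hg (pvDeps_subset_R hg hk)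
  have hnot : k ∉ pvClosure d (pvDeps d k) := (hg.2 k hk).2.2
  have hsub : pvClosure d (pvDeps d k) ⊆ (pvR d).erase k :=
    Finset.subset_erase.mpr ⟨hclR, hnot⟩
  have h1 := Finset.card_le_card hsub
  have h2 : ((pvR d).erase k).card < (pvR d).card := Finset.card_erase_lt_of_mem hk
  have h3 : (pvR d).card ≤ (pvU d).card := Finset.card_le_card (pvR_subset_U hg)
  unfold pvRank
  omega

theorem pvHash_mem_R (d : PySem.Dict String String) : "#" ∈ pvR d :=
  pvSubset_closure d _ (Finset.mem_singleton_self _)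

-- ---- parse-shape lemmas ----
theorem pvRefs_nil : pvRefs [] = [] := by rw [pvRefs.eq_def]
theorem pvRefs_one : pvRefs ['%'] = [] := by rw [pvRefs.eq_def]; rfl
theorem pvRefs_block (c : Char) (rest : List Char) :
    pvRefs ('%' :: c :: rest) = c :: pvRefs (rest.drop 1) := by
  rw [pvRefs.eq_def]; rfl
theorem pvRefs_char {c : Char} (hc : ¬ c = '%') (l : List Char) :
    pvRefs (c :: l) = pvRefs l := by
  rw [pvRefs.eq_def]; simp [hc]
theorem pvRefs_head_mem (c : Char) (rest : List Char) : c ∈ pvRefs ('%' :: c :: rest) := by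
  rw [pvRefs_block]; exact List.mem_cons_self
theorem pvRefs_tail_mem {c' : Char} {rest : List Char} (c : Char)
    (h : c' ∈ pvRefs (rest.drop 1)) : c' ∈ pvRefs ('%' :: c :: rest) := by
  rw [pvRefs_block]; exact List.mem_cons_of_mem _ h

theorem pvOk_one : pvOk ['%'] = false := by rw [pvOk.eq_def]; rfl
theorem pvOk_block (c : Char) (rest : List Char) :
    pvOk ('%' :: c :: rest) = pvOk (rest.drop 1) := by
  rw [pvOk.eq_def]; rfl
theorem pvOk_char {c : Char} (hc : ¬ c = '%') (l : List Char) :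
    pvOk (c :: l) = pvOk l := by
  rw [pvOk.eq_def]; simp [hc]

theorem pvT_nil (d : PySem.Dict String String) : pvT d [] = [] := by rw [pvT.eq_def]
theorem pvT_block (d : PySem.Dict String String) (c : Char) (rest : List Char) :
    pvT d ('%' :: c :: rest) = pvE d (pvKeyStr c) ++ pvT d (rest.drop 1) := by
  rw [pvT.eq_def]; rfl
theorem pvT_char {d : PySem.Dict String String} {c : Char} (hc : ¬ c = '%') (l : List Char) :
    pvT d (c :: l) = c :: pvT d l := by
  rw [pvT.eq_def]; simp [hc]

theorem pvExpStr_nil (d : PySem.Dict String String) (f : Nat) : pvExpStr d f [] = [] := by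
  rw [pvExpStr.eq_def]
theorem pvExpStr_one (d : PySem.Dict String String) (f : Nat) : pvExpStr d f ['%'] = [] := by
  rw [pvExpStr.eq_def]; rfl
theorem pvExpStr_block (d : PySem.Dict String String) (f : Nat) (c : Char) (rest : List Char) :
    pvExpStr d f ('%' :: c :: rest) =
      pvExpKey d f (pvKeyStr c) ++ pvExpStr d f (rest.drop 1) := by
  rw [pvExpStr.eq_def]; rfl
theorem pvExpStr_char {d : PySem.Dict String String} {c : Char} (hc : ¬ c = '%') (f : Nat)
    (l : List Char) : pvExpStr d f (c :: l) = c :: pvExpStr d f l := by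
  rw [pvExpStr.eq_def]; simp [hc]

theorem pvT_id {d : PySem.Dict String String} {l : List Char} (h : '%' ∉ l) :
    pvT d l = l := by
  induction l with
  | nil => exact pvT_nil d
  | cons c rest ih =>
    have hc : ¬ c = '%' := fun e => h (e ▸ List.mem_cons_self)
    rw [pvT_char hc, ih (fun hm => h (List.mem_cons_of_mem _ hm))]

theorem pvT_nopct' {d : PySem.Dict String String} :
    ∀ l : List Char, (∀ c ∈ pvRefs l, '%' ∉ pvE d (pvKeyStr c)) → pvOk l = true →
    '%' ∉ pvT d l := by
  intro l
  induction l using pvRefs.induct with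
  | case1 => intro _ _; rw [pvT_nil]; simp
  | case2 => intro _ hok; rw [pvOk_one] at hok; exact absurd hok (by simp)
  | case3 c rest ih =>
    intro hE hok
    rw [pvOk_block] at hok
    rw [pvT_block]
    simp only [List.mem_append]
    rintro (hm | hm)
    · exact hE c (pvRefs_head_mem c rest) hm
    · exact ih (fun c' hc' => hE c' (pvRefs_tail_mem c hc')) hok hm
  | case4 c rest h1 h2 ih =>
    intro hE hok
    have hc : ¬ c = '%' := by
      intro e
      cases rest with
      | nil => exact h1 e rfl
      | cons a t => exact h2 a t e rfl
    rw [pvOk_char hc] at hok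
    rw [pvT_char hc]
    simp only [List.mem_cons]
    rintro (rfl | hm)
    · exact hc rfl
    · exact ih (fun c' hc' => hE c' (by rwa [pvRefs_char hc])) hok hm

-- ---- stability of the fuel-indexed expansion ----
theorem pvExpStr_congr {d : PySem.Dict String String} {f g : Nat} :
    ∀ l : List Char,
    (∀ c ∈ pvRefs l, pvExpKey d f (pvKeyStr c) = pvExpKey d g (pvKeyStr c)) →
    pvExpStr d f l = pvExpStr d g l := by
  intro l
  induction l using pvRefs.induct with
  | case1 => intro _; rw [pvExpStr_nil, pvExpStr_nil]
  | case2 => intro _; rw [pvExpStr_one, pvExpStr_one]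
  | case3 c rest ih =>
    intro h
    rw [pvExpStr_block, pvExpStr_block]
    rw [h c (pvRefs_head_mem c rest)]
    rw [ih (fun c' hc' => h c' (pvRefs_tail_mem c hc'))]
  | case4 c rest h1 h2 ih =>
    intro h
    have hc : ¬ c = '%' := by
      intro e
      cases rest with
      | nil => exact h1 e rfl
      | cons a t => exact h2 a t e rfl
    rw [pvExpStr_char hc, pvExpStr_char hc]
    rw [ih (fun c' hc' => h c' (by rwa [pvRefs_char hc]))]

theorem pvExpKey_stable {d : PySem.Dict String String} (hg : pvGood d) :
    ∀ n k f g, k ∈ pvR d → pvRank d k < f → pvRank d k < g → pvRank d k ≤ n →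
      pvExpKey d f k = pvExpKey d g k := by
  intro n
  induction n with
  | zero =>
    intro k f g hk hf hg' hn
    match f, g with
    | f + 1, g + 1 =>
      simp only [pvExpKey]
      apply pvExpStr_congr
      intro c hc
      exfalso
      have hmem : pvKeyStr c ∈ pvDeps d k := by
        simp only [pvDeps, List.mem_toFinset, List.mem_map]
        exact ⟨c, hc, rfl⟩
      have : 0 < pvRank d k :=
        Finset.card_pos.mpr ⟨pvKeyStr c, pvSubset_closure d _ hmem⟩
      omega
  | succ n ih =>
    intro k f g hk hf hg' hn
    match f, g with
    | f + 1, g + 1 =>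
      simp only [pvExpKey]
      apply pvExpStr_congr
      intro c hc
      have hmem : pvKeyStr c ∈ pvDeps d k := by
        simp only [pvDeps, List.mem_toFinset, List.mem_map]
        exact ⟨c, hc, rfl⟩
      have hcR : pvKeyStr c ∈ pvR d := pvDeps_subset_R hg hk hmem
      have hlt : pvRank d (pvKeyStr c) < pvRank d k := pvRank_lt hg hk hmem
      exact ih (pvKeyStr c) f g hcR (by omega) (by omega) (by omega)

theorem pvExpKey_eq_E {d : PySem.Dict String String} (hg : pvGood d) {k : String} {f : Nat}
    (hk : k ∈ pvR d) (hf : pvRank d k < f) : pvExpKey d f k = pvE d k :=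
  pvExpKey_stable hg (pvRank d k) k f ((pvU d).card + 1) hk hf
    (by have := pvRank_lt_card hg hk; omega) le_rfl

theorem pvExpStr_eq_T {d : PySem.Dict String String} (hg : pvGood d) {f : Nat} :
    ∀ l : List Char, pvOk l = true →
    (∀ c ∈ pvRefs l, pvKeyStr c ∈ pvR d ∧ pvRank d (pvKeyStr c) < f) →
    pvExpStr d f l = pvT d l := by
  intro l
  induction l using pvRefs.induct with
  | case1 => intro _ _; rw [pvExpStr_nil, pvT_nil]
  | case2 => intro hok _; rw [pvOk_one] at hok; exact absurd hok (by simp)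
  | case3 c rest ih =>
    intro hok h
    rw [pvOk_block] at hok
    rw [pvExpStr_block, pvT_block]
    have hc := h c (pvRefs_head_mem c rest)
    rw [pvExpKey_eq_E hg hc.1 hc.2]
    rw [ih hok (fun c' hc' => h c' (pvRefs_tail_mem c hc'))]
  | case4 c rest h1 h2 ih =>
    intro hok h
    have hc : ¬ c = '%' := by
      intro e
      cases rest with
      | nil => exact h1 e rfl
      | cons a t => exact h2 a t e rfl
    rw [pvOk_char hc] at hok
    rw [pvExpStr_char hc, pvT_char hc]
    rw [ih hok (fun c' hc' => h c' (by rwa [pvRefs_char hc]))]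

theorem pvRefs_mem_R {d : PySem.Dict String String} (hg : pvGood d) {k : String}
    (hk : k ∈ pvR d) {c : Char} (hc : c ∈ pvRefs ((d.getD k "").toList)) :
    pvKeyStr c ∈ pvR d := by
  apply pvDeps_subset_R hg hk
  simp only [pvDeps, List.mem_toFinset, List.mem_map]
  exact ⟨c, hc, rfl⟩

theorem pvE_eq_T {d : PySem.Dict String String} (hg : pvGood d) {k : String}
    (hk : k ∈ pvR d) : pvE d k = pvT d (d.getD k "").toList := by
  show pvExpKey d ((pvU d).card + 1) k = _
  simp only [pvExpKey]
  apply pvExpStr_eq_T hg _ (hg.2 k hk).2.1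
  intro c hc
  have hcR := pvRefs_mem_R hg hk hc
  exact ⟨hcR, pvRank_lt_card hg hcR⟩

theorem pvE_nopct {d : PySem.Dict String String} (hg : pvGood d) :
    ∀ n k, k ∈ pvR d → pvRank d k ≤ n → '%' ∉ pvE d k := by
  intro n
  induction n with
  | zero =>
    intro k hk hn
    rw [pvE_eq_T hg hk]
    apply pvT_nopct' _ _ (hg.2 k hk).2.1
    intro c hc
    exfalso
    have hmem : pvKeyStr c ∈ pvDeps d k := by
      simp only [pvDeps, List.mem_toFinset, List.mem_map]
      exact ⟨c, hc, rfl⟩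
    have : 0 < pvRank d k :=
      Finset.card_pos.mpr ⟨pvKeyStr c, pvSubset_closure d _ hmem⟩
    omega
  | succ n ih =>
    intro k hk hn
    rw [pvE_eq_T hg hk]
    apply pvT_nopct' _ _ (hg.2 k hk).2.1
    intro c hc
    have hmem : pvKeyStr c ∈ pvDeps d k := by
      simp only [pvDeps, List.mem_toFinset, List.mem_map]
      exact ⟨c, hc, rfl⟩
    have hcR : pvKeyStr c ∈ pvR d := pvDeps_subset_R hg hk hmem
    have hlt : pvRank d (pvKeyStr c) < pvRank d k := pvRank_lt hg hk hmem
    exact ih (pvKeyStr c) hcR (by omega)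

-- ---- bridge facts ----
theorem pvIsIn_pct (s : String) : PySem.Str.isIn "%" s = s.toList.contains '%' := by
  rcases h : PySem.Str.isIn "%" s with _ | _
  · symm
    rw [Bool.eq_false_iff]
    intro hc
    rw [← Bool.not_eq_true, PySem.Str.isIn_iff_infix] at h
    exact h ((List.singleton_infix_iff _ _).mpr (by simpa using hc))
  · symm
    rw [PySem.Str.isIn_iff_infix] at h
    have := (List.singleton_infix_iff '%' s.toList).mp (by simpa using h)
    simpa using this

theorem pvJoin_toList (l : List String) :
    (PySem.Str.join "" l).toList = (l.map String.toList).flatten := by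
  have hint : ∀ l : List (List Char), List.intercalate ([] : List Char) l = l.flatten := by
    intro l
    induction l with
    | nil => rfl
    | cons a t ih =>
      cases t with
      | nil => simp [List.intercalate]
      | cons b t2 => simp_all [List.intercalate, List.intersperse]
  simp [PySem.Str.join, PySem.Chars.join, hint]

-- ---- the A side ----
def pvInv (d0 d' : PySem.Dict String String) : Prop :=
  d'.keys = d0.keys ∧
  ∀ k : String, d'.getD k "" = d0.getD k "" ∨
    (k ∈ pvR d0 ∧ (d'.getD k "").toList = pvE d0 k)

theorem pvSolveA_succ_t {f : Nat} {d' : PySem.Dict String String} {k : String}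
    (hcond : PySem.Str.isIn "%" (d'.getD k "") = true) :
    pvSolveA (f + 1) d' k =
      (PySem.Str.join "" (pvLoopA f d' (d'.getD k "").toList).1,
       (pvLoopA f d' (d'.getD k "").toList).2.insert k
         (PySem.Str.join "" (pvLoopA f d' (d'.getD k "").toList).1)) := by
  rw [pvSolveA.eq_def]
  dsimp only
  rw [hcond]
  simp

theorem pvSolveA_succ_f {f : Nat} {d' : PySem.Dict String String} {k : String}
    (hcond : PySem.Str.isIn "%" (d'.getD k "") = false) :
    pvSolveA (f + 1) d' k = (d'.getD k "", d') := by
  rw [pvSolveA.eq_def]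
  dsimp only
  rw [hcond]
  simp

theorem pvLoopA_nil (f : Nat) (d' : PySem.Dict String String) :
    pvLoopA f d' [] = ([], d') := by
  rw [pvLoopA.eq_def]

theorem pvLoopA_block (f : Nat) (d' : PySem.Dict String String) (c : Char) (rest : List Char) :
    pvLoopA f d' ('%' :: c :: rest) =
      ((pvSolveA f d' (pvKeyStr c)).1 ::
        (pvLoopA f (pvSolveA f d' (pvKeyStr c)).2 (rest.drop 1)).1,
       (pvLoopA f (pvSolveA f d' (pvKeyStr c)).2 (rest.drop 1)).2) := by
  rw [pvLoopA.eq_def]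
  simp [pvKeyStr]

theorem pvLoopA_char (f : Nat) (d' : PySem.Dict String String) {c : Char} (rest : List Char)
    (hc : ¬ c = '%') :
    pvLoopA f d' (c :: rest) =
      (c.toString :: (pvLoopA f d' rest).1, (pvLoopA f d' rest).2) := by
  rw [pvLoopA.eq_def]
  simp [hc]

theorem pvLoopA_spec {d0 : PySem.Dict String String} (hg : pvGood d0) (f1 : Nat)
    (IH : ∀ (d' : PySem.Dict String String) (k : String), pvInv d0 d' → k ∈ pvR d0 →
      pvRank d0 k < f1 →
      (pvSolveA f1 d' k).1.toList = pvE d0 k ∧ pvInv d0 (pvSolveA f1 d' k).2) :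
    ∀ l, pvOk l = true →
      (∀ c ∈ pvRefs l, pvKeyStr c ∈ pvR d0 ∧ pvRank d0 (pvKeyStr c) < f1) →
      ∀ d', pvInv d0 d' →
      ((pvLoopA f1 d' l).1.map String.toList).flatten = pvT d0 l ∧
        pvInv d0 (pvLoopA f1 d' l).2 := by
  intro l
  induction l using pvRefs.induct with
  | case1 =>
    intro _ _ d' hinv
    rw [pvLoopA_nil]
    exact ⟨by rw [pvT_nil]; simp, hinv⟩
  | case2 =>
    intro hok _ _ _
    rw [pvOk_one] at hok
    exact absurd hok (by simp)
  | case3 c rest ih =>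
    intro hok hrefs d' hinv
    rw [pvOk_block] at hok
    have hc := hrefs c (pvRefs_head_mem c rest)
    rw [pvLoopA_block]
    obtain ⟨h1, hinv2⟩ := IH d' (pvKeyStr c) hinv hc.1 hc.2
    obtain ⟨h2, hinv3⟩ := ih hok
      (fun c' hc' => hrefs c' (pvRefs_tail_mem c hc'))
      (pvSolveA f1 d' (pvKeyStr c)).2 hinv2
    refine ⟨?_, hinv3⟩
    simp only [List.map_cons, List.flatten_cons]
    rw [pvT_block, h1, h2]
  | case4 c rest h1 h2 ih =>
    intro hok hrefs d' hinv
    have hc : ¬ c = '%' := by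
      intro e
      cases rest with
      | nil => exact h1 e rfl
      | cons a t => exact h2 a t e rfl
    rw [pvOk_char hc] at hok
    rw [pvLoopA_char f1 d' rest hc]
    obtain ⟨hflat, hinv2⟩ := ih hok (fun c' hc' => hrefs c' (by rwa [pvRefs_char hc])) d' hinv
    refine ⟨?_, hinv2⟩
    simp only [List.map_cons, List.flatten_cons, pvT_char hc]
    rw [hflat]
    simp

theorem pvSolveA_spec {d0 : PySem.Dict String String} (hg : pvGood d0) :
    ∀ f (d' : PySem.Dict String String) (k : String), pvInv d0 d' → k ∈ pvR d0 →
      pvRank d0 k < f →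
      (pvSolveA f d' k).1.toList = pvE d0 k ∧ pvInv d0 (pvSolveA f d' k).2 := by
  intro f
  induction f with
  | zero =>
    intro d' k hinv hk hrank
    exact absurd hrank (by omega)
  | succ f1 ihf =>
    intro d' k hinv hk hrank
    rcases hinv.2 k with hsame | hexp
    · by_cases hpct : '%' ∈ (d'.getD k "").toList
      · have hcond : PySem.Str.isIn "%" (d'.getD k "") = true := by
          rw [pvIsIn_pct]; simpa using hpct
        rw [pvSolveA_succ_t hcond]
        have hok : pvOk (d'.getD k "").toList = true := by
          rw [hsame]; exact (hg.2 k hk).2.1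
        have hrefs : ∀ c ∈ pvRefs (d'.getD k "").toList,
            pvKeyStr c ∈ pvR d0 ∧ pvRank d0 (pvKeyStr c) < f1 := by
          rw [hsame]
          intro c hcm
          have hdep : pvKeyStr c ∈ pvDeps d0 k := by
            simp only [pvDeps, List.mem_toFinset, List.mem_map]
            exact ⟨c, hcm, rfl⟩
          have hcR : pvKeyStr c ∈ pvR d0 := pvDeps_subset_R hg hk hdep
          have := pvRank_lt hg hk hdep
          exact ⟨hcR, by omega⟩
        obtain ⟨hflat, hinvp⟩ := pvLoopA_spec hg f1 ihf _ hok hrefs d' hinv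
        have hout : (PySem.Str.join "" (pvLoopA f1 d' (d'.getD k "").toList).1).toList =
            pvE d0 k := by
          rw [pvJoin_toList, hflat, hsame, ← pvE_eq_T hg hk]
        refine ⟨hout, ?_, ?_⟩
        · rw [PySem.Dict.keys_insert_of_contains _ _
            ((PySem.Dict.contains_iff_mem_keys _ _).mpr
              (hinvp.1 ▸ (hg.2 k hk).1))]
          exact hinvp.1
        · intro k'
          rw [PySem.Dict.getD_insert]
          split
          · next he => right; exact ⟨he ▸ hk, by rw [he, hout]⟩
          · next hne => exact hinvp.2 k'
      · have hcond : PySem.Str.isIn "%" (d'.getD k "") = false := by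
          rw [pvIsIn_pct]; simpa using hpct
        rw [pvSolveA_succ_f hcond]
        have : pvE d0 k = (d0.getD k "").toList := by
          rw [pvE_eq_T hg hk]
          exact pvT_id (hsame ▸ hpct)
        exact ⟨by rw [hsame, this], hinv⟩
    · have hnp : '%' ∉ (d'.getD k "").toList := by
        rw [hexp.2]; exact pvE_nopct hg (pvRank d0 k) k hk le_rfl
      have hcond : PySem.Str.isIn "%" (d'.getD k "") = false := by
        rw [pvIsIn_pct]; simpa using hnp
      rw [pvSolveA_succ_f hcond]
      exact ⟨hexp.2, hinv⟩

-- ---- the B side ----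
theorem pvScan_nil : pvScan [] = some [] := by rw [pvScan.eq_def]
theorem pvScan_one : pvScan ['%'] = none := by rw [pvScan.eq_def]; rfl
theorem pvScan_block (c : Char) (rest : List Char) :
    pvScan ('%' :: c :: rest) = (pvScan (rest.drop 1)).map (c :: ·) := by
  rw [pvScan.eq_def]; rfl
theorem pvScan_char {c : Char} (hc : ¬ c = '%') (l : List Char) :
    pvScan (c :: l) = pvScan l := by
  rw [pvScan.eq_def]; simp [hc]
theorem pvOk_nil : pvOk [] = true := by rw [pvOk.eq_def]

theorem pvScan_ok : ∀ l : List Char, pvOk l = true → pvScan l = some (pvRefs l) := by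
  intro l
  induction l using pvRefs.induct with
  | case1 => intro _; rw [pvScan_nil, pvRefs_nil]
  | case2 => intro hok; rw [pvOk_one] at hok; exact absurd hok (by simp)
  | case3 c rest ih =>
    intro hok
    rw [pvOk_block] at hok
    rw [pvScan_block, pvRefs_block, ih hok]
    rfl
  | case4 c rest h1 h2 ih =>
    intro hok
    have hc : ¬ c = '%' := by
      intro e
      cases rest with
      | nil => exact h1 e rfl
      | cons a t => exact h2 a t e rfl
    rw [pvOk_char hc] at hok
    rw [pvScan_char hc, pvRefs_char hc]
    exact ih hok

theorem pvScan_some : ∀ l : List Char, ∀ rs, pvScan l = some rs → pvOk l = true := by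
  intro l
  induction l using pvRefs.induct with
  | case1 => intro rs _; exact pvOk_nil
  | case2 => intro rs h; rw [pvScan_one] at h; exact absurd h (by simp)
  | case3 c rest ih =>
    intro rs h
    rw [pvScan_block, Option.map_eq_some_iff] at h
    obtain ⟨rs', hrs', -⟩ := h
    rw [pvOk_block]
    exact ih rs' hrs'
  | case4 c rest h1 h2 ih =>
    intro rs h
    have hc : ¬ c = '%' := by
      intro e
      cases rest with
      | nil => exact h1 e rfl
      | cons a t => exact h2 a t e rfl
    rw [pvScan_char hc] at h
    rw [pvOk_char hc]
    exact ih rs h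

theorem pvSplice_nil (km : PySem.Dict String String) : pvSplice km [] = [] := by
  rw [pvSplice.eq_def]
theorem pvSplice_block (km : PySem.Dict String String) (c : Char) (rest : List Char) :
    pvSplice km ('%' :: c :: rest) =
      km.getD (pvKeyStr c) "" :: pvSplice km (rest.drop 1) := by
  rw [pvSplice.eq_def]; rfl
theorem pvSplice_char {c : Char} (hc : ¬ c = '%') (km : PySem.Dict String String)
    (l : List Char) : pvSplice km (c :: l) = c.toString :: pvSplice km l := by
  rw [pvSplice.eq_def]; simp [hc]

theorem pvSplice_flatten {d : PySem.Dict String String} {km : PySem.Dict String String} :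
    ∀ l : List Char, pvOk l = true →
    (∀ c ∈ pvRefs l, (km.getD (pvKeyStr c) "").toList = pvE d (pvKeyStr c)) →
    ((pvSplice km l).map String.toList).flatten = pvT d l := by
  intro l
  induction l using pvRefs.induct with
  | case1 => intro _ _; rw [pvSplice_nil, pvT_nil]; rfl
  | case2 => intro hok _; rw [pvOk_one] at hok; exact absurd hok (by simp)
  | case3 c rest ih =>
    intro hok h
    rw [pvOk_block] at hok
    rw [pvSplice_block, pvT_block]
    simp only [List.map_cons, List.flatten_cons]
    rw [h c (pvRefs_head_mem c rest)]
    rw [ih hok (fun c' hc' => h c' (pvRefs_tail_mem c hc'))]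
  | case4 c rest h1 h2 ih =>
    intro hok h
    have hc : ¬ c = '%' := by
      intro e
      cases rest with
      | nil => exact h1 e rfl
      | cons a t => exact h2 a t e rfl
    rw [pvOk_char hc] at hok
    rw [pvSplice_char hc, pvT_char hc]
    simp only [List.map_cons, List.flatten_cons]
    rw [ih hok (fun c' hc' => h c' (by rwa [pvRefs_char hc]))]
    simp

theorem pvSplice_nopct {km : PySem.Dict String String} :
    ∀ l : List Char, pvOk l = true →
    (∀ c ∈ pvRefs l, '%' ∉ (km.getD (pvKeyStr c) "").toList) →
    '%' ∉ ((pvSplice km l).map String.toList).flatten := by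
  intro l
  induction l using pvRefs.induct with
  | case1 => intro _ _; rw [pvSplice_nil]; simp
  | case2 => intro hok _; rw [pvOk_one] at hok; exact absurd hok (by simp)
  | case3 c rest ih =>
    intro hok h
    rw [pvOk_block] at hok
    rw [pvSplice_block]
    simp only [List.map_cons, List.flatten_cons, List.mem_append]
    rintro (hm | hm)
    · exact h c (pvRefs_head_mem c rest) hm
    · exact ih hok (fun c' hc' => h c' (pvRefs_tail_mem c hc')) hm
  | case4 c rest h1 h2 ih =>
    intro hok h
    have hc : ¬ c = '%' := by
      intro e
      cases rest with
      | nil => exact h1 e rfl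
      | cons a t => exact h2 a t e rfl
    rw [pvOk_char hc] at hok
    rw [pvSplice_char hc]
    simp only [List.map_cons, List.flatten_cons]
    intro hm
    rcases List.mem_append.mp hm with hm1 | hm2
    · simp at hm1; exact hc hm1.symm
    · exact ih hok (fun c' hc' => h c' (by rwa [pvRefs_char hc])) hm2

-- store invariant for B's table: every value is its original or a %-free string
-- that is the full expansion whenever the key is reachable
def pvSInv (d km : PySem.Dict String String) : Prop :=
  km.keys = d.keys ∧
  ∀ k : String, km.getD k "" = d.getD k "" ∨
    ('%' ∉ (km.getD k "").toList ∧ (k ∈ pvR d → (km.getD k "").toList = pvE d k))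

theorem pvDoKey_getD_ne (km : PySem.Dict String String) (k r : String) (h : r ≠ k) :
    (pvDoKey km k).getD r "" = km.getD r "" := by
  unfold pvDoKey
  split
  · split
    · rfl
    · split
      · rw [PySem.Dict.getD_insert]
        simp [h]
      · rfl
  · rfl

theorem pvDoKey_keys (km : PySem.Dict String String) (k : String) :
    (pvDoKey km k).keys = km.keys := by
  unfold pvDoKey
  split
  · next hcond =>
    split
    · rfl
    · split
      · apply PySem.Dict.keys_insert_of_contains
        by_contra hnc
        rw [Bool.not_eq_true] at hnc
        rw [PySem.Dict.getD_of_not_contains km "" hnc] at hcond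
        exact absurd hcond (by decide)
      · rfl
  · rfl

theorem pvDoKey_res_mono (km : PySem.Dict String String) (k r : String)
    (h : '%' ∉ (km.getD r "").toList) : '%' ∉ ((pvDoKey km k).getD r "").toList := by
  by_cases hrk : r = k
  · subst hrk
    unfold pvDoKey
    split
    · next hcond =>
      exfalso
      rw [pvIsIn_pct] at hcond
      exact h (by simpa using hcond)
    · exact h
  · rw [pvDoKey_getD_ne km k r hrk]
    exact h

theorem pvDoKey_SInv {d : PySem.Dict String String} (hg : pvGood d)
    (km : PySem.Dict String String) (k : String) (h : pvSInv d km) :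
    pvSInv d (pvDoKey km k) := by
  refine ⟨(pvDoKey_keys km k).trans h.1, ?_⟩
  intro k'
  by_cases hk' : k' = k
  · subst hk'
    unfold pvDoKey
    split
    · next hcond =>
      split
      · exact h.2 k'
      · next rs hscan =>
        split
        · next hall =>
          rw [PySem.Dict.getD_insert, if_pos rfl]
          right
          have hok : pvOk (km.getD k' "").toList = true := pvScan_some _ rs hscan
          have hrs : rs = pvRefs (km.getD k' "").toList := by
            have := pvScan_ok _ hok
            rw [hscan] at this
            exact Option.some_inj.mp this
          subst hrs
          rw [List.all_eq_true] at hall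
          have hresolved : ∀ c ∈ pvRefs (km.getD k' "").toList,
              '%' ∉ (km.getD (pvKeyStr c) "").toList := by
            intro c hcm
            have := hall (pvKeyStr c) (List.mem_map_of_mem hcm)
            rw [Bool.and_eq_true, Bool.not_eq_eq_eq_not, Bool.not_true, pvIsIn_pct] at this
            simpa using this.2
          constructor
          · rw [pvJoin_toList]
            exact pvSplice_nopct _ hok hresolved
          · intro hkR
            -- the stored value is still the original (it contains '%')
            have hpct : '%' ∈ (km.getD k' "").toList := by
              rw [pvIsIn_pct] at hcond; simpa using hcond
            have horig : km.getD k' "" = d.getD k' "" := by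
              rcases h.2 k' with h1 | h2
              · exact h1
              · exact absurd hpct h2.1
            rw [pvJoin_toList]
            have hErefs : ∀ c ∈ pvRefs (km.getD k' "").toList,
                (km.getD (pvKeyStr c) "").toList = pvE d (pvKeyStr c) := by
              intro c hcm
              have hcR : pvKeyStr c ∈ pvR d := by
                apply pvRefs_mem_R hg hkR
                rwa [← horig]
              rcases h.2 (pvKeyStr c) with h1 | h2
              · -- still original, but %-free: its expansion is itself
                rw [h1]
                rw [pvE_eq_T hg hcR]
                have : '%' ∉ (d.getD (pvKeyStr c) "").toList := by
                  rw [← h1]; exact hresolved c hcm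
                exact (pvT_id this).symm
              · exact h2.2 hcR
            rw [pvSplice_flatten _ hok hErefs]
            rw [horig, ← pvE_eq_T hg hkR]
        · exact h.2 k'
    · exact h.2 k'
  · rw [pvDoKey_getD_ne km k k' hk']
    exact h.2 k'

theorem pvFold_SInv {d : PySem.Dict String String} (hg : pvGood d) :
    ∀ (l : List String) (km : PySem.Dict String String), pvSInv d km →
    pvSInv d (l.foldl pvDoKey km) := by
  intro l
  induction l with
  | nil => intro km h; exact h
  | cons a t ih =>
    intro km h
    exact ih _ (pvDoKey_SInv hg km a h)

theorem pvFold_res_mono :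
    ∀ (l : List String) (km : PySem.Dict String String) (r : String),
    '%' ∉ (km.getD r "").toList → '%' ∉ ((l.foldl pvDoKey km).getD r "").toList := by
  intro l
  induction l with
  | nil => intro km r h; exact h
  | cons a t ih =>
    intro km r h
    exact ih _ r (pvDoKey_res_mono km a r h)

theorem pvDoKey_resolves {d : PySem.Dict String String} (hg : pvGood d)
    (km : PySem.Dict String String) (k : String) (h : pvSInv d km) (hk : k ∈ pvR d)
    (hdeps : ∀ k' ∈ pvDeps d k, '%' ∉ (km.getD k' "").toList) :
    '%' ∉ ((pvDoKey km k).getD k "").toList := by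
  by_cases hpct : '%' ∈ (km.getD k "").toList
  · have horig : km.getD k "" = d.getD k "" := by
      rcases h.2 k with h1 | h2
      · exact h1
      · exact absurd hpct h2.1
    have hcond : PySem.Str.isIn "%" (km.getD k "") = true := by
      rw [pvIsIn_pct]; simpa using hpct
    have hok : pvOk (km.getD k "").toList = true := by
      rw [horig]; exact (hg.2 k hk).2.1
    have hscan := pvScan_ok _ hok
    have hall : ((pvRefs (km.getD k "").toList).map pvKeyStr).all
        (fun r => km.contains r && !(PySem.Str.isIn "%" (km.getD r ""))) = true := by
      rw [List.all_eq_true]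
      intro r hr
      obtain ⟨c, hcm, rfl⟩ := List.mem_map.mp hr
      have hdep : pvKeyStr c ∈ pvDeps d k := by
        simp only [pvDeps, List.mem_toFinset, List.mem_map]
        exact ⟨c, by rwa [← horig], rfl⟩
      have hcR : pvKeyStr c ∈ pvR d := pvDeps_subset_R hg hk hdep
      have hckeys : pvKeyStr c ∈ km.keys := by
        rw [h.1]; exact (hg.2 _ hcR).1
      rw [Bool.and_eq_true]
      constructor
      · exact (PySem.Dict.contains_iff_mem_keys _ _).mpr hckeys
      · rw [Bool.not_eq_eq_eq_not, Bool.not_true, pvIsIn_pct]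
        simpa using hdeps _ hdep
    unfold pvDoKey
    rw [if_pos hcond, hscan]
    simp only [hall, if_pos]
    rw [PySem.Dict.getD_insert, if_pos rfl]
    rw [pvJoin_toList]
    apply pvSplice_nopct _ hok
    intro c hcm
    have hdep : pvKeyStr c ∈ pvDeps d k := by
      simp only [pvDeps, List.mem_toFinset, List.mem_map]
      exact ⟨c, by rwa [← horig], rfl⟩
    exact hdeps _ hdep
  · exact pvDoKey_res_mono km k k hpct

theorem pvFold_resolves {d : PySem.Dict String String} (hg : pvGood d) (k : String)
    (hk : k ∈ pvR d) :
    ∀ (l : List String) (km : PySem.Dict String String), pvSInv d km →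
    (∀ k' ∈ pvDeps d k, '%' ∉ (km.getD k' "").toList) → k ∈ l →
    '%' ∉ ((l.foldl pvDoKey km).getD k "").toList := by
  intro l
  induction l with
  | nil => intro km _ _ hmem; exact absurd hmem (by simp)
  | cons a t ih =>
    intro km hinv hdeps hmem
    rw [List.foldl_cons]
    by_cases hak : a = k
    · subst hak
      apply pvFold_res_mono
      exact pvDoKey_resolves hg km a hinv hk hdeps
    · have hmem' : k ∈ t := by
        rcases List.mem_cons.mp hmem with h1 | h1
        · exact absurd h1.symm hak
        · exact h1
      exact ih _ (pvDoKey_SInv hg km a hinv)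
        (fun k' hk' => pvDoKey_res_mono km a k' (hdeps k' hk')) hmem'

-- the round loop, with the range-fold rewritten as function iteration
theorem pvFoldRange_rounds :
    ∀ (t : Nat) (km : PySem.Dict String String),
    (List.range t).foldl (fun d _ => pvRoundB d) km = pvRoundB^[t] km := by
  intro t
  induction t with
  | zero => intro km; rfl
  | succ t ih =>
    intro km
    rw [List.range_succ, List.foldl_append, ih, List.foldl_cons, List.foldl_nil,
      Function.iterate_succ_apply']

theorem pvRounds_spec {d : PySem.Dict String String} (hg : pvGood d) :
    ∀ t : Nat, pvSInv d (pvRoundB^[t] d) ∧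
      ∀ k ∈ pvR d, pvRank d k < t → '%' ∉ ((pvRoundB^[t] d).getD k "").toList := by
  intro t
  induction t with
  | zero =>
    refine ⟨⟨rfl, fun k => Or.inl rfl⟩, ?_⟩
    intro k _ h
    exact absurd h (by omega)
  | succ t ih =>
    obtain ⟨hinv, hres⟩ := ih
    rw [Function.iterate_succ_apply']
    constructor
    · exact pvFold_SInv hg _ _ hinv
    · intro k hk hrank
      by_cases hlt : pvRank d k < t
      · exact pvFold_res_mono _ _ _ (hres k hk hlt)
      · have hdeps : ∀ k' ∈ pvDeps d k, '%' ∉ ((pvRoundB^[t] d).getD k' "").toList := by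
          intro k' hk'
          have hk'R : k' ∈ pvR d := pvDeps_subset_R hg hk hk'
          have := pvRank_lt hg hk hk'
          exact hres k' hk'R (by omega)
        have hmem : k ∈ (pvRoundB^[t] d).keys := by
          rw [hinv.1]; exact (hg.2 k hk).1
        exact pvFold_resolves hg k hk _ _ hinv hdeps hmem

-- ---- facts about the built dict ----
theorem pvBuild_nodup (replacements : List (List String)) (text : String) :
    (pvBuild replacements text).keys.Nodup := by
  have step : ∀ (l : List (List String)) (d : PySem.Dict String String),
      d.keys.Nodup → (l.foldl (fun d row => match row with | [k, v] => d.insert k v | _ => d) d).keys.Nodup := by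
    intro l
    induction l with
    | nil => intro d h; exact h
    | cons row t ih =>
      intro d h
      simp only [List.foldl_cons]
      apply ih
      rcases row with _ | ⟨k, _ | ⟨v, _ | _⟩⟩ <;>
        first
          | exact h
          | exact PySem.Dict.nodup_keys_insert _ _ _ h
  exact step _ _ (PySem.Dict.nodup_keys_insert _ _ _ PySem.Dict.nodup_keys_empty)

theorem pvBuild_keys_len (replacements : List (List String)) (text : String) :
    (pvBuild replacements text).keys.length ≤ replacements.length + 1 := by
  have hone : ∀ (d : PySem.Dict String String) (k v : String),
      (d.insert k v).keys.length ≤ d.keys.length + 1 := by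
    intro d k v
    simp only [PySem.Dict.keys]
    rw [PySem.Dict.items_insert]
    split <;> simp
  have step : ∀ (l : List (List String)) (d : PySem.Dict String String),
      (l.foldl (fun d row => match row with | [k, v] => d.insert k v | _ => d) d).keys.length ≤
        d.keys.length + l.length := by
    intro l
    induction l with
    | nil => intro d; simp
    | cons row t ih =>
      intro d
      simp only [List.foldl_cons, List.length_cons]
      have hih := ih (match row with | [k, v] => d.insert k v | _ => d)
      have h2 : (match row with | [k, v] => d.insert k v | _ => d).keys.length ≤
          d.keys.length + 1 := by
        rcases row with _ | ⟨k, _ | ⟨v, _ | _⟩⟩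
        · simp
        · simp
        · exact hone d k v
        · simp
      omega
  have h0 : ((PySem.Dict.empty.insert "#" text :
      PySem.Dict String String)).keys.length ≤ 1 := by
    simp [PySem.Dict.keys, PySem.Dict.items_insert, PySem.Dict.empty]
  have := step replacements (PySem.Dict.empty.insert "#" text)
  unfold pvBuild
  omega

-- ---- bridging the list-based Pre_ to the Finset-based proof machinery ----
theorem pvRefsS_eq : ∀ l : List Char, pvRefsS l = pvRefs l := by
  intro l
  induction l using pvRefsS.induct with
  | case1 => simp [pvRefsS, pvRefs_nil]
  | case2 => simp [pvRefsS, pvRefs_one]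
  | case3 c => rw [pvRefs_block]; simp [pvRefsS, pvRefs_nil]
  | case4 c x rest ih => rw [pvRefs_block]; simp [pvRefsS, ih]
  | case5 rest h1 h2 h3 =>
    exfalso
    cases rest with
    | nil => exact h1 rfl rfl
    | cons a t =>
      cases t with
      | nil => exact h2 a rfl rfl
      | cons b t2 => exact h3 a b t2 rfl rfl
  | case6 c rest h1 h2 h3 hc ih =>
    rw [pvRefs_char hc]
    simp [pvRefsS, hc, ih]

theorem pvOkS_eq : ∀ l : List Char, pvOkS l = pvOk l := by
  intro l
  induction l using pvOkS.induct with
  | case1 => simp [pvOkS, pvOk_nil]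
  | case2 => simp [pvOkS, pvOk_one]
  | case3 c => rw [pvOk_block]; simp [pvOkS, pvOk_nil]
  | case4 c x rest ih => rw [pvOk_block]; simp [pvOkS, ih]
  | case5 rest h1 h2 h3 =>
    exfalso
    cases rest with
    | nil => exact h1 rfl rfl
    | cons a t =>
      cases t with
      | nil => exact h2 a rfl rfl
      | cons b t2 => exact h3 a b t2 rfl rfl
  | case6 c rest h1 h2 h3 hc ih =>
    rw [pvOk_char hc]
    simp [pvOkS, hc, ih]

theorem pvKeysOf_toFinset (d : PySem.Dict String String) (k : String) :
    (pvKeysOf d k).toFinset = pvDeps d k := by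
  simp [pvKeysOf, pvDeps, pvRefsS_eq]

theorem pvMem_keysOf {d : PySem.Dict String String} {k x : String} :
    x ∈ pvKeysOf d k ↔ x ∈ pvDeps d k := by
  rw [← pvKeysOf_toFinset, List.mem_toFinset]

theorem pvStepList_toFinset (d : PySem.Dict String String) (S : List String) :
    (pvStepList d S).toFinset = pvStep d S.toFinset := by
  ext x
  simp [pvStepList, pvStep, pvMem_keysOf]

theorem pvIterList_toFinset (d : PySem.Dict String String) :
    ∀ (n : Nat) (S : List String),
    (pvIterList d n S).toFinset = (pvStep d)^[n] S.toFinset := by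
  intro n
  induction n with
  | zero => intro S; rfl
  | succ n ih =>
    intro S
    show (pvStepList d (pvIterList d n S)).toFinset = _
    rw [pvStepList_toFinset, ih, Function.iterate_succ_apply']

theorem pvClosList_toFinset {d : PySem.Dict String String} (hnd : d.keys.Nodup)
    (S : List String) : (pvClosList d S).toFinset = pvClosure d S.toFinset := by
  unfold pvClosList pvClosure
  rw [pvIterList_toFinset, List.toFinset_card_of_nodup hnd]

theorem pvRList_toFinset {d : PySem.Dict String String} (hnd : d.keys.Nodup) :
    (pvRList d).toFinset = pvR d := by
  unfold pvRList pvR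
  rw [pvClosList_toFinset hnd]
  have : (["#"] : List String).toFinset = ({"#"} : Finset String) := by simp
  rw [this]

theorem pvPre_good {replacements : List (List String)} {text : String}
    (hpre : Pre_applySubstitutions replacements text) : pvGood (pvBuild replacements text) := by
  have hnd := pvBuild_nodup replacements text
  refine ⟨hnd, ?_⟩
  intro k hk
  have hkL : k ∈ pvRList (pvBuild replacements text) := by
    rw [← List.mem_toFinset, pvRList_toFinset hnd]
    exact hk
  have h := (List.all_eq_true.mp hpre.2) k hkL
  rw [Bool.and_eq_true, Bool.and_eq_true] at h
  obtain ⟨⟨h1, h2⟩, h3⟩ := h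
  refine ⟨by simpa using h1, by rw [← pvOkS_eq]; exact h2, ?_⟩
  intro hmem
  have hmemL : k ∈ pvClosList (pvBuild replacements text)
      (pvKeysOf (pvBuild replacements text) k) := by
    rw [← List.mem_toFinset, pvClosList_toFinset hnd, pvKeysOf_toFinset]
    exact hmem
  simp [hmemL] at h3

-- ===== VERDICT (by name: the statement is the Claim_ definition above) =====
theorem applySubstitutions_spec : Claim_equal_applySubstitutions := by
  intro replacements text hdom hpre
  unfold Spec_applySubstitutions applySubstitutions applySubstitutions_alt
  have hg := pvPre_good hpre
  set d := pvBuild replacements text with hd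
  have hnd : d.keys.Nodup := pvBuild_nodup replacements text
  have hhash : "#" ∈ pvR d := pvHash_mem_R d
  have hUcard : (pvU d).card = d.keys.length := by
    simp [pvU, List.toFinset_card_of_nodup hnd]
  have hlen : d.keys.length ≤ replacements.length + 1 := pvBuild_keys_len replacements text
  have hrank : pvRank d "#" < replacements.length + 2 := by
    have := pvRank_lt_card hg hhash
    omega
  obtain ⟨hA, -⟩ := pvSolveA_spec hg (replacements.length + 2) d "#"
    ⟨rfl, fun k => Or.inl rfl⟩ hhash hrank
  have hB : ((pvRoundB^[d.keys.length + 1] d).getD "#" "").toList = pvE d "#" := by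
    obtain ⟨hinv, hres⟩ := pvRounds_spec hg (d.keys.length + 1)
    have hrank2 : pvRank d "#" < d.keys.length + 1 := by
      have := pvRank_lt_card hg hhash
      omega
    have hnopct := hres "#" hhash hrank2
    rcases hinv.2 "#" with h1 | h2
    · rw [h1]
      rw [pvE_eq_T hg hhash]
      rw [pvT_id (h1 ▸ hnopct)]
    · exact h2.2 hhash
  show _ = ((List.range (d.keys.length + 1)).foldl (fun x _ => pvRoundB x) d).getD "#" ""
  rw [pvFoldRange_rounds]
  have hAB : (pvSolveA (replacements.length + 2) d "#").1.toList =
      ((pvRoundB^[d.keys.length + 1] d).getD "#" "").toList := by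
    rw [hA, hB]
  calc (pvSolveA (replacements.length + 2) d "#").1
      = String.ofList (pvSolveA (replacements.length + 2) d "#").1.toList :=
        (String.ofList_toList).symm
  _ = String.ofList ((pvRoundB^[d.keys.length + 1] d).getD "#" "").toList := by rw [hAB]
  _ = (pvRoundB^[d.keys.length + 1] d).getD "#" "" := String.ofList_toList
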